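-- pv_equiv track=rewrite | github.com/bonjovi07/Sort-A-K-Sorted-Array-in-Python | Sort A K Sorted Array.py | bracketing
-- ===== SOURCE A (Python) =====
-- def bracketing(n_list,k):
--     double_list = []
--     for i in range(len(n_list)):
--         my_list = []
--         for j in range(len(n_list)):
--             x, y = j, j
--             for k in range(k + 1):
--                 if x == i or y == i:
--                     my_list.append(n_list[j])
--                 x += 1
--                 y -= 1
--         double_list.append(my_list)
--     return double_list
-- ===== SOURCE B (Python) =====
-- def bracketing(n_list, k):
--     # Scatter each source element into every window that contains it,
--     # instead of gathering per destination with A's triple nest.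
--     n = len(n_list)
--     double_list = [[] for _ in range(n)]
--     for j in range(n):
--         lo = max(0, j - k)
--         hi = min(n - 1, j + k)
--         for i in range(lo, hi + 1):
--             double_list[i].append(n_list[j])
--     return double_list
-- ===== Notes on version B (the rewrite author's own statement) =====
-- stated objective: faster
-- what changed: Replaced A's gather-per-destination triple nest (for each i, scan every j and walk t=0..k checking j+t==i or j-t==i) by a scatter: one pass over source indices j appending n_list[j] into the clamped window [max(0,j-k), min(n-1,j+k)] of a pre-allocated list of buckets.
import Mathlib
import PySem

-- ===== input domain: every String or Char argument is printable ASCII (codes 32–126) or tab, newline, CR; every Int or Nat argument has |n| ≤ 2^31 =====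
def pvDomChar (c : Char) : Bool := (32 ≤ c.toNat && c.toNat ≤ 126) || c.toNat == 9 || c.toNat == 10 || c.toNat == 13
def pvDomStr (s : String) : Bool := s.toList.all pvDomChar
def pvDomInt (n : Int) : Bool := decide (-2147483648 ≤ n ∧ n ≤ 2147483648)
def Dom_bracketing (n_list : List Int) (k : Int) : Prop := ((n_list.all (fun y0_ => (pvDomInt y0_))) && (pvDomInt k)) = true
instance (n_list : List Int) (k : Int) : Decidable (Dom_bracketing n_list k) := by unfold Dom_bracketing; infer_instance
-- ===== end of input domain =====

-- B replaces A's gather-per-destination triple nest by a single scatter pass over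
-- source indices into a pre-allocated bucket list (asymptotically fewer steps).

-- ===== PORT A =====
-- Literal port of A's triple nest. Note on the shadowed loop variable: Python's
-- `for k in range(k + 1)` evaluates range(k+1) before rebinding k, and the last value
-- the loop assigns to k is k itself (or the loop body never runs), so the variable k
-- is unchanged at every use of `range(k + 1)`; the port therefore keeps k fixed.
def bracketing (n_list : List Int) (k : Int) : List (List Int) :=
  (PySem.List.pyRange 0 (n_list.length : Int) 1).foldl (fun double_list i =>
    let my_list : List Int :=
      (PySem.List.pyRange 0 (n_list.length : Int) 1).foldl (fun my_list j =>
        ((PySem.List.pyRange 0 (k + 1) 1).foldl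
          (fun (st : List Int × Int × Int) _k =>
            ((if st.2.1 = i ∨ st.2.2 = i then st.1 ++ [PySem.List.pyGetD n_list j 0] else st.1),
             st.2.1 + 1, st.2.2 - 1))
          (my_list, j, j)).1) []
    double_list ++ [my_list]) []

-- ===== PORT B =====
-- Literal port of Source B. In `double_list[i].append(...)`, i ≥ 0 always holds
-- (lo = max(0, j-k)), so `.toNat` on the index is exact.
def bracketing_alt (n_list : List Int) (k : Int) : List (List Int) :=
  let n : Int := (n_list.length : Int)
  let init : List (List Int) := (PySem.List.pyRange 0 n 1).map (fun _ => [])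
  (PySem.List.pyRange 0 n 1).foldl (fun double_list j =>
    let lo : Int := max 0 (j - k)
    let hi : Int := min (n - 1) (j + k)
    (PySem.List.pyRange lo (hi + 1) 1).foldl
      (fun dl i => dl.modify i.toNat (fun l => l ++ [PySem.List.pyGetD n_list j 0])) double_list)
    init

-- ===== PRECONDITION & SPEC =====
def Spec_bracketing (n_list : List Int) (k : Int) (out : List (List Int)) : Prop := out = bracketing_alt n_list k
instance (n_list : List Int) (k : Int) (out : List (List Int)) : Decidable (Spec_bracketing n_list k out) := by unfold Spec_bracketing; infer_instance

-- ===== CLAIM (what is proved, stated in full; the proofs are below) =====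
def Claim_equal_bracketing : Prop := ∀ (n_list : List Int) (k : Int), Dom_bracketing n_list k → Spec_bracketing n_list k (bracketing n_list k)

-- ===== LEMMAS AND PROOFS =====

-- The common normal form: bucket i lists, in ascending source order j, the elements
-- n_list[j] whose index lies within k of i.
def pvBucket (n_list : List Int) (k i : Int) : List Int :=
  ((PySem.List.pyRange 0 (n_list.length : Int) 1).filter
      (fun j => decide (j - k ≤ i ∧ i ≤ j + k))).map
    (fun j => PySem.List.pyGetD n_list j 0)

-- A's innermost loop: the loop variable is ignored, so only the length matters.
theorem pvInnerA (i : Int) (v : Int) :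
    ∀ (l : List Int) (ml : List Int) (x y : Int), y ≤ x →
      (l.foldl (fun (st : List Int × Int × Int) _k =>
          ((if st.2.1 = i ∨ st.2.2 = i then st.1 ++ [v] else st.1),
           st.2.1 + 1, st.2.2 - 1)) (ml, x, y)).1
      = ml ++ (if (x ≤ i ∧ i < x + (l.length : Int)) ∨ (y - (l.length : Int) < i ∧ i ≤ y)
               then [v] else []) := by
  intro l
  induction l with
  | nil => intro ml x y _; simp
  | cons a l ih =>
    intro ml x y hyx
    simp only [List.foldl_cons]
    rw [ih _ (x+1) (y-1) (by omega)]
    by_cases hx : x = i ∨ y = i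
    · simp only [if_pos hx]
      have h1 : ¬ ((x + 1 ≤ i ∧ i < x + 1 + (l.length : Int)) ∨
          (y - 1 - (l.length : Int) < i ∧ i ≤ y - 1)) := by omega
      have h2 : (x ≤ i ∧ i < x + ((a :: l).length : Int)) ∨
          (y - ((a :: l).length : Int) < i ∧ i ≤ y) := by simp; omega
      rw [if_neg h1, if_pos h2]; simp
    · simp only [if_neg hx]
      have h3 : ((x + 1 ≤ i ∧ i < x + 1 + (l.length : Int)) ∨
            (y - 1 - (l.length : Int) < i ∧ i ≤ y - 1)) ↔
          ((x ≤ i ∧ i < x + ((a :: l).length : Int)) ∨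
            (y - ((a :: l).length : Int) < i ∧ i ≤ y)) := by simp; omega
      by_cases h : (x + 1 ≤ i ∧ i < x + 1 + (l.length : Int)) ∨
          (y - 1 - (l.length : Int) < i ∧ i ≤ y - 1)
      · rw [if_pos h, if_pos (h3.mp h)]
      · rw [if_neg h, if_neg (fun hc => h (h3.mpr hc))]

-- A's middle loop accumulates exactly the filtered/mapped bucket.
theorem pvGatherFold (P : Int → Prop) [DecidablePred P] (f : Int → Int) :
    ∀ (l : List Int) (ml : List Int),
      l.foldl (fun acc j => acc ++ (if P j then [f j] else [])) ml
      = ml ++ (l.filter (fun j => decide (P j))).map f := by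
  intro l
  induction l with
  | nil => intro ml; simp
  | cons a l ih =>
    intro ml
    simp only [List.foldl_cons, List.filter_cons]
    by_cases h : P a
    · rw [if_pos h, ih]; simp [h]
    · rw [if_neg h, ih]; simp [h]

-- A computes the bucket at every destination index.
theorem pvA_eq_map (n_list : List Int) (k : Int) :
    bracketing n_list k
      = (PySem.List.pyRange 0 (n_list.length : Int) 1).map (pvBucket n_list k) := by
  unfold bracketing
  rw [PySem.List.foldl_append_singleton_eq_map]
  apply List.map_congr_left
  intro i _
  have hlen : ((PySem.List.pyRange 0 (k + 1) 1).length : Int) = max (k + 1) 0 := by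
    rw [PySem.List.length_pyRange_one]; omega
  have hstep : ∀ (my_list : List Int) (j : Int),
      ((PySem.List.pyRange 0 (k + 1) 1).foldl
        (fun (st : List Int × Int × Int) _k =>
          ((if st.2.1 = i ∨ st.2.2 = i then st.1 ++ [PySem.List.pyGetD n_list j 0] else st.1),
           st.2.1 + 1, st.2.2 - 1)) (my_list, j, j)).1
      = my_list ++ (if j - k ≤ i ∧ i ≤ j + k then [PySem.List.pyGetD n_list j 0] else []) := by
    intro my_list j
    rw [pvInnerA i _ _ my_list j j le_rfl]
    by_cases h : j - k ≤ i ∧ i ≤ j + k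
    · rw [if_pos h, if_pos (by omega)]
    · rw [if_neg h, if_neg (by omega)]
  calc (PySem.List.pyRange 0 (n_list.length : Int) 1).foldl (fun my_list j =>
          ((PySem.List.pyRange 0 (k + 1) 1).foldl
            (fun (st : List Int × Int × Int) _k =>
              ((if st.2.1 = i ∨ st.2.2 = i then st.1 ++ [PySem.List.pyGetD n_list j 0] else st.1),
               st.2.1 + 1, st.2.2 - 1)) (my_list, j, j)).1) []
      = (PySem.List.pyRange 0 (n_list.length : Int) 1).foldl (fun my_list j =>
          my_list ++ (if j - k ≤ i ∧ i ≤ j + k then [PySem.List.pyGetD n_list j 0] else [])) [] := by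
        apply PySem.List.foldl_congr_mem
        intro ml j _; exact hstep ml j
    _ = pvBucket n_list k i := by
        rw [pvGatherFold (fun j => j - k ≤ i ∧ i ≤ j + k) (fun j => PySem.List.pyGetD n_list j 0)]
        rfl

-- B's inner scatter: appending v at every index in [lo, lo+len), seen through getElem?.
theorem pvInnerB (v : Int) :
    ∀ (len : Nat) (lo : Int) (dl : List (List Int)), 0 ≤ lo →
      ∀ (m : Nat),
        ((PySem.List.pyRange lo (lo + (len : Int)) 1).foldl
          (fun dl i => dl.modify i.toNat (fun l => l ++ [v])) dl)[m]?
        = if lo ≤ (m : Int) ∧ (m : Int) < lo + (len : Int)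
          then (dl[m]?).map (fun l => l ++ [v]) else dl[m]? := by
  intro len
  induction len with
  | zero =>
    intro lo dl _ m
    rw [PySem.List.pyRange_one_eq_nil (by omega)]
    simp
  | succ p ih =>
    intro lo dl hlo m
    rw [PySem.List.pyRange_one_cons (by omega)]
    simp only [List.foldl_cons]
    have h2 : (lo + 1) + (p : Int) = lo + ((p + 1 : Nat) : Int) := by push_cast; omega
    rw [← h2] at *
    rw [ih (lo + 1) _ (by omega) m]
    by_cases hm : (m : Int) = lo
    · have hne : ¬ (lo + 1 ≤ (m : Int) ∧ (m : Int) < lo + 1 + (p : Int)) := by omega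
      rw [if_neg hne, if_pos (by omega)]
      rw [List.getElem?_modify]
      have heq : lo.toNat = m := by omega
      cases dl[m]? <;> simp [heq]
    · by_cases hr : lo + 1 ≤ (m : Int) ∧ (m : Int) < lo + 1 + (p : Int)
      · rw [if_pos hr, if_pos (by omega)]
        rw [List.getElem?_modify]
        have hne : ¬ lo.toNat = m := by omega
        cases dl[m]? <;> simp [hne]
      · rw [if_neg hr, if_neg (by omega)]
        rw [List.getElem?_modify]
        have hne : ¬ lo.toNat = m := by omega
        cases dl[m]? <;> simp [hne]

-- B's outer loop: each processed source j appends its element to exactly its window.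
theorem pvOuterB (n_list : List Int) (k : Int) :
    ∀ (js : List Int) (dl : List (List Int)),
      (∀ j ∈ js, 0 ≤ j) →
      ∀ (m : Nat),
        ((js.foldl (fun double_list j =>
            (PySem.List.pyRange (max 0 (j - k)) ((min ((n_list.length : Int) - 1) (j + k)) + 1) 1).foldl
              (fun dl i => dl.modify i.toNat (fun l => l ++ [PySem.List.pyGetD n_list j 0])) double_list)
          dl))[m]?
        = (dl[m]?).map (fun l => l ++
            ((js.filter (fun j => decide (max 0 (j - k) ≤ (m : Int) ∧ (m : Int) ≤ min ((n_list.length : Int) - 1) (j + k)))).map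
              (fun j => PySem.List.pyGetD n_list j 0))) := by
  intro js
  induction js with
  | nil => intro dl _ m; simp
  | cons a js ih =>
    intro dl hpos m
    simp only [List.foldl_cons]
    set lo : Int := max 0 (a - k) with hlo
    set hi : Int := min ((n_list.length : Int) - 1) (a + k) with hhi
    have hlo0 : 0 ≤ lo := by omega
    have hrange : hi + 1 = lo + ((hi + 1 - lo).toNat : Int) ∨ hi + 1 ≤ lo := by omega
    rw [ih _ (fun j hj => hpos j (List.mem_cons_of_mem a hj)) m]
    rcases hrange with h | h
    · rw [h, pvInnerB _ _ lo dl hlo0 m]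
      simp only [List.filter_cons]
      by_cases hc : lo ≤ (m : Int) ∧ (m : Int) ≤ hi
      · rw [if_pos (by omega)]
        have : (decide (max 0 (a - k) ≤ (m : Int) ∧ (m : Int) ≤ min ((n_list.length : Int) - 1) (a + k))) = true := by
          rw [← hlo, ← hhi]; simp; omega
        rw [this]
        cases dl[m]? <;> simp
      · rw [if_neg (by omega)]
        have : (decide (max 0 (a - k) ≤ (m : Int) ∧ (m : Int) ≤ min ((n_list.length : Int) - 1) (a + k))) = false := by
          rw [← hlo, ← hhi]; simp; omega
        rw [this]; simp
    · rw [PySem.List.pyRange_one_eq_nil h]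
      simp only [List.foldl_nil, List.filter_cons]
      have : (decide (max 0 (a - k) ≤ (m : Int) ∧ (m : Int) ≤ min ((n_list.length : Int) - 1) (a + k))) = false := by
        rw [← hlo, ← hhi]; simp; omega
      rw [this]; simp

-- B computes the bucket at every destination index.
theorem pvB_eq_map (n_list : List Int) (k : Int) :
    bracketing_alt n_list k
      = (PySem.List.pyRange 0 (n_list.length : Int) 1).map (pvBucket n_list k) := by
  unfold bracketing_alt
  apply List.ext_getElem?
  intro m
  rw [pvOuterB n_list k _ _ (fun j hj => by
    rw [PySem.List.mem_pyRange_one] at hj; omega) m]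
  by_cases hm : m < n_list.length
  · have h1 : ((PySem.List.pyRange 0 (n_list.length : Int) 1).map (fun _ => ([] : List Int)))[m]?
        = some [] := by
      rw [List.getElem?_eq_getElem (by simpa using hm)]
      simp
    have h2 : ((PySem.List.pyRange 0 (n_list.length : Int) 1).map (pvBucket n_list k))[m]?
        = some (pvBucket n_list k (m : Int)) := by
      rw [List.getElem?_eq_getElem (by simpa using hm)]
      simp [PySem.List.getElem_pyRange_one]
    rw [h1, h2]
    simp only [Option.map_some, List.nil_append, Option.some_inj]
    unfold pvBucket
    apply congrArg
    apply List.filter_congr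
    intro j hj
    rw [PySem.List.mem_pyRange_one] at hj
    simp only [decide_eq_decide]
    omega
  · have h1 : ((PySem.List.pyRange 0 (n_list.length : Int) 1).map (fun _ => ([] : List Int)))[m]?
        = none := by
      rw [List.getElem?_eq_none]; simpa using hm
    have h2 : ((PySem.List.pyRange 0 (n_list.length : Int) 1).map (pvBucket n_list k))[m]?
        = none := by
      rw [List.getElem?_eq_none]; simpa using hm
    rw [h1, h2]; rfl

-- ===== VERDICT (by name: the statement is the Claim_ definition above) =====
theorem bracketing_spec : Claim_equal_bracketing := by
  intro n_list k _
  unfold Spec_bracketing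
  rw [pvA_eq_map, pvB_eq_map]
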